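-- pv_equiv track=rewrite | github.com/Richi-20/InteligeciaArtificial-RCC | ingeDuran/lcg_unix.py | has_full_period
-- ===== SOURCE A (Python) =====
-- from math import gcd
--
-- def prime_factors(n: int):
--     """Factores primos sin repetición."""
--     fac = set()
--     d = 2
--     while d * d <= n:
--         if n % d == 0:
--             fac.add(d)
--             while n % d == 0:
--                 n //= d
--         d += 1 if d == 2 else 2  # probar 2 y luego solo impares
--     if n > 1:
--         fac.add(n)
--     return fac
--
-- def has_full_period(a: int, c: int, m: int) -> bool:
--     """
--     Hull–Dobell:
--       1) gcd(c, m) = 1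
--       2) a-1 es múltiplo de todos los primos de m
--       3) Si m es múltiplo de 4, entonces a-1 es múltiplo de 4
--     """
--     if gcd(c, m) != 1:
--         return False
--     primes_m = prime_factors(m)
--     for p in primes_m:
--         if (a - 1) % p != 0:
--             return False
--     if m % 4 == 0 and (a - 1) % 4 != 0:
--         return False
--     return True
-- ===== SOURCE B (Python) =====
-- from math import gcd
--
-- def has_full_period(a, c, m):
--     if gcd(c, m) != 1:
--         return False
--     if m > 1:
--         # Hull-Dobell condition 2 via iterated-gcd radical reduction:
--         # m reduces to 1 iff every prime of m divides a-1.
--         t = m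
--         while True:
--             g = gcd(t, a - 1)
--             if g == 1:
--                 break
--             t //= g
--         if t != 1:
--             return False
--     if m % 4 == 0 and (a - 1) % 4 != 0:
--         return False
--     return True
-- ===== Notes on version B (the rewrite author's own statement) =====
-- stated objective: simpler
-- what changed: Replaces trial-division prime factorisation (prime_factors helper) plus a per-prime divisibility loop by an inline iterated-gcd radical test (t := m; repeatedly t //= gcd(t, a-1) until the gcd is 1; Hull-Dobell condition 2 holds iff t == 1), keeping the gcd(c,m) and mod-4 checks.
import Mathlib
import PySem

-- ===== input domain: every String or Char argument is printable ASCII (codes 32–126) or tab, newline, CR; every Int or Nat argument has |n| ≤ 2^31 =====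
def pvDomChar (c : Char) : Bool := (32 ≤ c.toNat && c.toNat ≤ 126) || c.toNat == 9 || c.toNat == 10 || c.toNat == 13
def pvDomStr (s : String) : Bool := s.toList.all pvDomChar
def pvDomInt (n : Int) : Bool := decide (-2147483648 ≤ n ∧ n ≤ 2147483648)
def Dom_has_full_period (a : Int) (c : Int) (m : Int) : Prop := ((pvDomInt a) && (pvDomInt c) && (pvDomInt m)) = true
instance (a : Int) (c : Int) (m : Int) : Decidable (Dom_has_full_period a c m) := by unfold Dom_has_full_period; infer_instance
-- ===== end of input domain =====

-- B replaces A's trial-division factorisation + per-prime loop by an inline iterated-gcd radical test for Hull-Dobell condition 2 (simpler: no factoring helper, a short gcd loop).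

-- ===== PORT A =====
-- inner 'while n % d == 0: n //= d' of prime_factors; the dite guards (2 <= d, 1 <= n)
-- only make the recursion total: they hold on every state Python's loop reaches
def pfStrip (n d : Int) : Int :=
  if h : 2 ≤ d ∧ 1 ≤ n ∧ PySem.Int.mod n d = 0 then pfStrip (PySem.Int.floordiv n d) d else n
termination_by n.toNat
decreasing_by
  have h1 : PySem.Int.floordiv n d = n / d := PySem.Int.floordiv_eq_ediv_of_pos (by omega)
  have h2 : n/d < n := by
    have := Nat.div_lt_self (n := n.toNat) (k := d.toNat) (by omega) (by omega)
    have e : n / d = ((n.toNat / d.toNat : Nat) : Int) := by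
      rw [Int.natCast_ediv, Int.toNat_of_nonneg (show (0:Int) ≤ n by omega), Int.toNat_of_nonneg (show (0:Int) ≤ d by omega)]
    omega
  simp [h1]; omega

lemma pfStrip_le (n d : Int) : pfStrip n d ≤ n := by
  induction n using pfStrip.induct (d := d) with
  | case1 n h ih =>
    rw [pfStrip, dif_pos h]
    have h1 : PySem.Int.floordiv n d = n / d := PySem.Int.floordiv_eq_ediv_of_pos (by omega)
    have h2 : n / d ≤ n := Int.ediv_le_self _ (by omega)
    omega
  | case2 n h => rw [pfStrip, dif_neg h]


-- outer 'while d * d <= n' of prime_factors plus the final 'if n > 1' add;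
-- the guard 2 <= d only makes the recursion total (d starts at 2 and only grows)
def pfOuter (n d : Int) (fac : List Int) : List Int :=
  if h : 2 ≤ d ∧ d * d ≤ n then
    if PySem.Int.mod n d = 0 then
      pfOuter (pfStrip n d) (if d = 2 then 3 else d + 2) (PySem.Set.add fac d)
    else
      pfOuter n (if d = 2 then 3 else d + 2) fac
  else
    if 1 < n then PySem.Set.add fac n else fac
termination_by (n + 1 - d).toNat
decreasing_by
  · have hs := pfStrip_le n d
    have : d ≤ d * d := le_mul_of_one_le_left (by omega) (by omega)
    split <;> omega
  · have : d ≤ d * d := le_mul_of_one_le_left (by omega) (by omega)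
    split <;> omega

def prime_factors (n : Int) : List Int := pfOuter n 2 []

def has_full_period (a : Int) (c : Int) (m : Int) : Bool :=
  if Int.gcd c m ≠ 1 then false
  else if ¬ (prime_factors m).all (fun p => PySem.Int.mod (a - 1) p == 0) then false
  else if PySem.Int.mod m 4 = 0 ∧ PySem.Int.mod (a - 1) 4 ≠ 0 then false
  else true

-- ===== PORT B =====
-- 'while True: g = gcd(t, a-1); if g == 1: break; t //= g' of Source B; the guard 0 < t
-- only makes the recursion total (t starts at m >= 2 and stays positive)
def reduceRad (t x : Nat) : Nat :=
  let g := Nat.gcd t x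
  if h : 1 < g ∧ 0 < t then reduceRad (t / g) x else t
termination_by t
decreasing_by exact Nat.div_lt_self h.2 h.1


def has_full_period_alt (a : Int) (c : Int) (m : Int) : Bool :=
  if Int.gcd c m ≠ 1 then false
  else if 1 < m ∧ reduceRad m.toNat (a - 1).natAbs ≠ 1 then false
  else if PySem.Int.mod m 4 = 0 ∧ PySem.Int.mod (a - 1) 4 ≠ 0 then false
  else true

-- ===== PRECONDITION & SPEC =====
def Spec_has_full_period (a : Int) (c : Int) (m : Int) (out : Bool) : Prop := out = has_full_period_alt a c m
instance (a : Int) (c : Int) (m : Int) (out : Bool) : Decidable (Spec_has_full_period a c m out) := by unfold Spec_has_full_period; infer_instance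

-- ===== CLAIM (what is proved, stated in full; the proofs are below) =====
def Claim_equal_has_full_period : Prop := ∀ (a : Int) (c : Int) (m : Int), Dom_has_full_period a c m → Spec_has_full_period a c m (has_full_period a c m)

-- ===== LEMMAS AND PROOFS =====
lemma pfStrip_pos (n d : Int) (hn : 1 ≤ n) : 1 ≤ pfStrip n d := by
  induction n using pfStrip.induct (d := d) with
  | case1 n h ih =>
    rw [pfStrip, dif_pos h]
    have h1 : PySem.Int.floordiv n d = n / d := PySem.Int.floordiv_eq_ediv_of_pos (by omega)
    have hdvd : d ∣ n := (PySem.Int.mod_eq_zero_iff_dvd n d).mp h.2.2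
    have h2 : 1 ≤ n / d := by
      rcases hdvd with ⟨k, hk⟩
      have hke : n / d = k := by rw [hk, Int.mul_ediv_cancel_left _ (by omega)]
      nlinarith [h.2.1, h.1]
    exact ih (by rw [h1]; exact h2)
  | case2 n h => rw [pfStrip, dif_neg h]; exact hn

lemma pfStrip_dvd (n d : Int) : pfStrip n d ∣ n := by
  induction n using pfStrip.induct (d := d) with
  | case1 n h ih =>
    rw [pfStrip, dif_pos h]
    have h1 : PySem.Int.floordiv n d = n / d := PySem.Int.floordiv_eq_ediv_of_pos (by omega)
    have hdvd : d ∣ n := (PySem.Int.mod_eq_zero_iff_dvd n d).mp h.2.2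
    have h2 : n / d ∣ n := by
      rcases hdvd with ⟨k, hk⟩
      have hke : n / d = k := by rw [hk, Int.mul_ediv_cancel_left _ (by omega)]
      exact hke ▸ Dvd.intro_left d hk.symm
    exact dvd_trans (h1 ▸ ih) h2
  | case2 n h => rw [pfStrip, dif_neg h]

lemma pfStrip_not_dvd (n d : Int) (hd : 2 ≤ d) (hn : 1 ≤ n) : ¬ d ∣ pfStrip n d := by
  induction n using pfStrip.induct (d := d) with
  | case1 n h ih =>
    rw [pfStrip, dif_pos h]
    have h1 : PySem.Int.floordiv n d = n / d := PySem.Int.floordiv_eq_ediv_of_pos (by omega)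
    have hdvd : d ∣ n := (PySem.Int.mod_eq_zero_iff_dvd n d).mp h.2.2
    have h2 : 1 ≤ n / d := by
      rcases hdvd with ⟨k, hk⟩
      have hke : n / d = k := by rw [hk, Int.mul_ediv_cancel_left _ (by omega)]
      nlinarith [h.2.1, h.1]
    exact ih (by rw [h1]; exact h2)
  | case2 n h =>
    rw [pfStrip, dif_neg h]
    intro hdvd
    exact h ⟨hd, hn, (PySem.Int.mod_eq_zero_iff_dvd n d).mpr hdvd⟩

lemma pfStrip_prime_dvd (n d : Int) (hd : 2 ≤ d) (hn : 1 ≤ n) (q : ℕ) (hq : q.Prime)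
    (hdvd : (q : Int) ∣ n) : (q : Int) ∣ pfStrip n d ∨ (q : Int) ∣ d := by
  induction n using pfStrip.induct (d := d) with
  | case1 n h ih =>
    rw [pfStrip, dif_pos h]
    have h1 : PySem.Int.floordiv n d = n / d := PySem.Int.floordiv_eq_ediv_of_pos (by omega)
    have hdn : d ∣ n := (PySem.Int.mod_eq_zero_iff_dvd n d).mp h.2.2
    rcases hdn with ⟨k, hk⟩
    have hke : n / d = k := by rw [hk, Int.mul_ediv_cancel_left _ (by omega)]
    have hk1 : 1 ≤ k := by nlinarith [h.2.1, h.1]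
    have hqp : Prime (q : Int) := Nat.prime_iff_prime_int.mp hq
    rcases hqp.dvd_mul.mp (hk ▸ hdvd) with hqd | hqk
    · exact Or.inr hqd
    · exact ih (by rw [h1, hke]; exact hk1) (by rw [h1, hke]; exact hqk)
  | case2 n h =>
    rw [pfStrip, dif_neg h]
    exact Or.inl hdvd

-- in the divisible branch the trial divisor d must itself be prime
lemma trial_div_prime (n d : Int) (hd2 : 2 ≤ d) (hn : 1 ≤ n) (hddvd : d ∣ n)
    (hinv : ∀ q : ℕ, q.Prime → (q : Int) < d → ¬ (q : Int) ∣ n) : d.natAbs.Prime := by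
  by_contra hnp
  have hD2 : 2 ≤ d.natAbs := by omega
  have hnall : ¬ ∀ m < d.natAbs, m ∣ d.natAbs → m = 1 :=
    fun hall => hnp (Nat.prime_def_lt.mpr ⟨hD2, hall⟩)
  push_neg at hnall
  rcases hnall with ⟨m, hmlt, hmdvd, hm1⟩
  have hm2 : 2 ≤ m := by
    have : 0 < m := Nat.pos_of_dvd_of_pos hmdvd (by omega)
    omega
  have hq := Nat.minFac_prime (show m ≠ 1 by omega)
  have hqm : m.minFac ∣ m := Nat.minFac_dvd m
  have hqlt : (m.minFac : Int) < d := by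
    have h1 : m.minFac ≤ m := Nat.minFac_le (by omega)
    have : (d.natAbs : Int) = d := by omega
    omega
  have hqn : (m.minFac : Int) ∣ n := by
    have h1 : (m.minFac : Int) ∣ (m : Int) := Int.natCast_dvd_natCast.mpr hqm
    have h2 : (m : Int) ∣ (d.natAbs : Int) := Int.natCast_dvd_natCast.mpr hmdvd
    have h3 : (d.natAbs : Int) = d := by omega
    exact dvd_trans h1 (dvd_trans (h3 ▸ h2) hddvd)
  exact hinv m.minFac hq hqlt hqn

-- primes below the next trial divisor are primes below d, or d itself
lemma next_d_gap (d : Int) (hd2 : 2 ≤ d) (hodd : d = 2 ∨ d % 2 = 1) (q : ℕ) (hq : q.Prime)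
    (hlt : (q : Int) < (if d = 2 then 3 else d + 2)) : (q : Int) < d ∨ (q : Int) = d := by
  rcases hodd with h2 | hodd2
  · subst h2; simp at hlt; omega
  · have hne : d ≠ 2 := by omega
    rw [if_neg hne] at hlt
    rcases lt_trichotomy ((q : Int)) d with h | h | h
    · exact Or.inl h
    · exact Or.inr h
    · exfalso
      have hqd1 : (q : Int) = d + 1 := by omega
      have heven : Even q := by
        have h0 : (q : Int) % 2 = 0 := by omega
        exact Nat.even_iff.mpr (by omega)
      have := (Nat.Prime.even_iff hq).mp heven
      omega

-- after the loop ends (d*d > n) an n ≥ 2 with no prime factor below d is prime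
lemma tail_prime (n d : Int) (hd2 : 2 ≤ d) (hn2 : 2 ≤ n) (hlt : n < d * d)
    (hinv : ∀ q : ℕ, q.Prime → (q : Int) < d → ¬ (q : Int) ∣ n) : n.natAbs.Prime := by
  set N := n.natAbs with hN
  have hNn : (N : Int) = n := by omega
  by_contra hnp
  have hq := Nat.minFac_prime (show N ≠ 1 by omega)
  have hqdvd : N.minFac ∣ N := Nat.minFac_dvd N
  have hqn : (N.minFac : Int) ∣ n := hNn ▸ Int.natCast_dvd_natCast.mpr hqdvd
  have hdq : d ≤ (N.minFac : Int) := by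
    by_contra h
    exact hinv N.minFac hq (by omega) hqn
  have hco : N / N.minFac ≠ 1 := by
    intro h1
    have : N = N.minFac := by
      have := Nat.div_mul_cancel hqdvd
      rw [h1, one_mul] at this
      omega
    exact hnp (show Nat.Prime N by rw [this]; exact hq)
  have hcop : 0 < N / N.minFac := Nat.div_pos (Nat.minFac_le (by omega)) (Nat.minFac_pos N)
  have hr := Nat.minFac_prime hco
  have hrdvd : (N / N.minFac).minFac ∣ N := dvd_trans (Nat.minFac_dvd _) (Nat.div_dvd_of_dvd hqdvd)
  have hrn : ((N / N.minFac).minFac : Int) ∣ n := hNn ▸ Int.natCast_dvd_natCast.mpr hrdvd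
  have hdr : d ≤ ((N / N.minFac).minFac : Int) := by
    by_contra h
    exact hinv (N / N.minFac).minFac hr (by omega) hrn
  have hmul : N.minFac * (N / N.minFac) = N := Nat.mul_div_cancel' hqdvd
  have hrle : (N / N.minFac).minFac ≤ N / N.minFac := Nat.minFac_le hcop
  have hNge : N.minFac * (N / N.minFac).minFac ≤ N := by
    calc N.minFac * (N / N.minFac).minFac ≤ N.minFac * (N / N.minFac) :=
          Nat.mul_le_mul_left _ hrle
      _ = N := hmul
  have : d * d ≤ n := by
    have h1 : d * d ≤ (N.minFac : Int) * ((N / N.minFac).minFac : Int) := by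
      have := mul_le_mul hdq hdr (by omega) (by positivity)
      linarith
    have h2 : (N.minFac : Int) * ((N / N.minFac).minFac : Int) ≤ (N : Int) := by
      exact_mod_cast Int.ofNat_le.mpr hNge
    omega
  omega

lemma pfOuter_mem (n d : Int) (fac : List Int) :
    2 ≤ d → 1 ≤ n → (d = 2 ∨ d % 2 = 1) →
    (∀ q : ℕ, q.Prime → (q : Int) < d → ¬ (q : Int) ∣ n) →
    ∀ p, p ∈ pfOuter n d fac ↔ p ∈ fac ∨ (1 < p ∧ p.natAbs.Prime ∧ p ∣ n) := by
  induction n, d, fac using pfOuter.induct with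
  | case1 n d fac h hmod ih =>
    intro hd2 hn hodd hinv p
    simp only [dite_eq_ite] at ih
    rw [pfOuter, dif_pos h, if_pos hmod]
    have hn4 : 4 ≤ n := by nlinarith [h.1, h.2]
    have hddvd : d ∣ n := (PySem.Int.mod_eq_zero_iff_dvd n d).mp hmod
    have hdprime : d.natAbs.Prime := trial_div_prime n d hd2 (by omega) hddvd hinv
    have hs_pos : 1 ≤ pfStrip n d := pfStrip_pos n d (by omega)
    have hs_dvd : pfStrip n d ∣ n := pfStrip_dvd n d
    have hs_ndvd : ¬ d ∣ pfStrip n d := pfStrip_not_dvd n d hd2 (by omega)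
    have hd2' : 2 ≤ (if d = 2 then 3 else d + 2) := by split <;> omega
    have hodd' : (if d = 2 then 3 else d + 2) = 2 ∨ (if d = 2 then 3 else d + 2) % 2 = 1 := by
      right
      rcases hodd with h2 | h2
      · rw [if_pos h2]; decide
      · rw [if_neg (by omega : ¬ d = 2)]; omega
    have hinv' : ∀ q : ℕ, q.Prime → (q : Int) < (if d = 2 then 3 else d + 2) →
        ¬ (q : Int) ∣ pfStrip n d := by
      intro q hq hlt hqdvd
      rcases next_d_gap d hd2 hodd q hq hlt with hlt' | heq
      · exact hinv q hq hlt' (dvd_trans hqdvd hs_dvd)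
      · exact hs_ndvd (heq ▸ hqdvd)
    rw [ih hd2' hs_pos hodd' hinv' p, PySem.Set.mem_add]
    constructor
    · rintro ((hf | hpd) | ⟨hp1, hpp, hpdvd⟩)
      · exact Or.inl hf
      · subst hpd; exact Or.inr ⟨by omega, hdprime, hddvd⟩
      · exact Or.inr ⟨hp1, hpp, dvd_trans hpdvd hs_dvd⟩
    · rintro (hf | ⟨hp1, hpp, hpdvd⟩)
      · exact Or.inl (Or.inl hf)
      · have hpq : p = ((p.natAbs : ℕ) : Int) := by omega
        have hqd' := pfStrip_prime_dvd n d hd2 (by omega) p.natAbs hpp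
          (by rw [← hpq]; exact hpdvd)
        rcases hqd' with hqs | hqd
        · exact Or.inr ⟨hp1, hpp, by rw [hpq]; exact hqs⟩
        · have heq : p.natAbs = d.natAbs :=
            (Nat.prime_dvd_prime_iff_eq hpp hdprime).mp (Int.ofNat_dvd_left.mp hqd)
          exact Or.inl (Or.inr (by omega))
  | case2 n d fac h hmod ih =>
    intro hd2 hn hodd hinv p
    simp only [dite_eq_ite] at ih
    rw [pfOuter, dif_pos h, if_neg hmod]
    have hd2' : 2 ≤ (if d = 2 then 3 else d + 2) := by split <;> omega
    have hodd' : (if d = 2 then 3 else d + 2) = 2 ∨ (if d = 2 then 3 else d + 2) % 2 = 1 := by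
      right
      rcases hodd with h2 | h2
      · rw [if_pos h2]; decide
      · rw [if_neg (by omega : ¬ d = 2)]; omega
    have hinv' : ∀ q : ℕ, q.Prime → (q : Int) < (if d = 2 then 3 else d + 2) →
        ¬ (q : Int) ∣ n := by
      intro q hq hlt hqdvd
      rcases next_d_gap d hd2 hodd q hq hlt with hlt' | heq
      · exact hinv q hq hlt' hqdvd
      · exact hmod ((PySem.Int.mod_eq_zero_iff_dvd n d).mpr (heq ▸ hqdvd))
    exact ih hd2' hn hodd' hinv' p
  | case3 n d fac h hn1 =>
    intro hd2 hn hodd hinv p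
    rw [pfOuter, dif_neg h, if_pos hn1]
    have hlt : n < d * d := not_le.mp (fun hh => h ⟨hd2, hh⟩)
    have hprime : n.natAbs.Prime := tail_prime n d hd2 (by omega) hlt hinv
    rw [PySem.Set.mem_add]
    constructor
    · rintro (hf | hpn)
      · exact Or.inl hf
      · subst hpn; exact Or.inr ⟨by omega, hprime, dvd_rfl⟩
    · rintro (hf | ⟨hp1, hpp, hpdvd⟩)
      · exact Or.inl hf
      · right
        have heq := (Nat.prime_dvd_prime_iff_eq hpp hprime).mp (Int.natAbs_dvd_natAbs.mpr hpdvd)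
        omega
  | case4 n d fac h hn1 =>
    intro hd2 hn hodd hinv p
    rw [pfOuter, dif_neg h, if_neg hn1]
    constructor
    · exact Or.inl
    · rintro (hf | ⟨hp1, hpp, hpdvd⟩)
      · exact hf
      · exfalso
        have hn1' : n = 1 := by omega
        subst hn1'
        have := Int.le_of_dvd (by omega) hpdvd
        omega

lemma prime_factors_mem (m : Int) (hm : 1 ≤ m) (p : Int) :
    p ∈ prime_factors m ↔ 1 < p ∧ p.natAbs.Prime ∧ p ∣ m := by
  rw [prime_factors, pfOuter_mem m 2 [] (by omega) hm (Or.inl rfl)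
    (fun q hq hlt _ => by have := hq.two_le; omega) p]
  simp

lemma prime_factors_nonpos (m : Int) (hm : m ≤ 0) : prime_factors m = [] := by
  rw [prime_factors, pfOuter, dif_neg (by omega), if_neg (by omega)]

lemma reduceRad_eq_one_iff (t x : Nat) :
    1 ≤ t → (reduceRad t x = 1 ↔ ∀ q : ℕ, q.Prime → q ∣ t → q ∣ x) := by
  induction t using Nat.strong_induction_on with
  | _ t ih =>
    intro ht
    rw [reduceRad]
    by_cases h : 1 < Nat.gcd t x ∧ 0 < t
    · rw [dif_pos h]
      have hgt : Nat.gcd t x ∣ t := Nat.gcd_dvd_left t x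
      have hgx : Nat.gcd t x ∣ x := Nat.gcd_dvd_right t x
      have htg : 1 ≤ t / Nat.gcd t x := Nat.div_pos (Nat.le_of_dvd ht hgt) (by omega)
      rw [ih (t / Nat.gcd t x) (Nat.div_lt_self h.2 h.1) htg]
      constructor
      · intro hall q hq hqt
        have hmul : Nat.gcd t x * (t / Nat.gcd t x) = t := Nat.mul_div_cancel' hgt
        rw [← hmul] at hqt
        rcases (Nat.Prime.dvd_mul hq).mp hqt with hg | hdiv
        · exact dvd_trans hg hgx
        · exact hall q hq hdiv
      · intro hall q hq hqtg
        exact hall q hq (dvd_trans hqtg (Nat.div_dvd_of_dvd hgt))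
    · rw [dif_neg h]
      have hg0 : Nat.gcd t x ≠ 0 := fun h0 => by
        have := Nat.eq_zero_of_gcd_eq_zero_left h0; omega
      have hg1 : Nat.gcd t x = 1 := by
        rcases not_and_or.mp h with hg | htz
        · omega
        · omega
      constructor
      · intro h1 q hq hqt
        rw [h1] at hqt
        exact absurd (Nat.dvd_one.mp hqt) (by have := hq.two_le; omega)
      · intro hall
        by_contra htne
        have hqp := Nat.minFac_prime (show t ≠ 1 by omega)
        have hqx := hall t.minFac hqp (Nat.minFac_dvd t)
        have hd : t.minFac ∣ Nat.gcd t x := Nat.dvd_gcd (Nat.minFac_dvd t) hqx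
        rw [hg1] at hd
        exact absurd (Nat.dvd_one.mp hd) (by have := hqp.two_le; omega)

lemma middle_iff (a m : Int) (hm : 1 < m) :
    ((prime_factors m).all (fun p => PySem.Int.mod (a - 1) p == 0) = true) ↔
    reduceRad m.toNat (a - 1).natAbs = 1 := by
  have hmem := prime_factors_mem m (by omega)
  rw [List.all_eq_true, reduceRad_eq_one_iff m.toNat _ (by omega)]
  constructor
  · intro hall q hq hqm
    have hqmi : (q : Int) ∣ m := by
      have h1 := Int.natCast_dvd_natCast.mpr hqm
      rwa [Int.toNat_of_nonneg (by omega : (0:Int) ≤ m)] at h1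
    have hp := (hmem (q : Int)).mpr
      ⟨by exact_mod_cast hq.one_lt, by simpa using hq, hqmi⟩
    have h2 := hall _ hp
    rw [beq_iff_eq, PySem.Int.mod_eq_zero_iff_dvd] at h2
    exact Int.ofNat_dvd_left.mp h2
  · intro hred p hp
    obtain ⟨hp1, hpp, hpm⟩ := (hmem p).mp hp
    have e : m.toNat = m.natAbs := by omega
    have hq := hred p.natAbs hpp (e ▸ Int.natAbs_dvd_natAbs.mpr hpm)
    rw [beq_iff_eq, PySem.Int.mod_eq_zero_iff_dvd]
    have h3 : ((p.natAbs : ℕ) : Int) ∣ (a - 1) := Int.ofNat_dvd_left.mpr hq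
    rwa [show ((p.natAbs : ℕ) : Int) = p by omega] at h3


-- ===== VERDICT (by name: the statement is the Claim_ definition above) =====
theorem has_full_period_spec : Claim_equal_has_full_period := by
  intro a c m _
  unfold Spec_has_full_period
  unfold has_full_period has_full_period_alt
  by_cases hg : Int.gcd c m ≠ 1
  · simp [hg]
  · by_cases hm : 1 < m
    · have h := middle_iff a m hm
      by_cases hall : (prime_factors m).all (fun p => PySem.Int.mod (a - 1) p == 0) = true
      · simp [hg, hall, hm, h.mp hall]
      · have hne : reduceRad m.toNat (a - 1).natAbs ≠ 1 := fun he => hall (h.mpr he)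
        simp [hg, hall, hm, hne]
    · have hpf : prime_factors m = [] := by
        by_cases h0 : m ≤ 0
        · exact prime_factors_nonpos m h0
        · have : m = 1 := by omega
          subst this
          rw [prime_factors, pfOuter, dif_neg (by omega), if_neg (by omega)]
      simp [hg, hpf, hm]
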